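-- pv_equiv track=rewrite | github.com/YeePas/kookboek | scripts/import-koksopleiding.py | subtitle_for
-- ===== SOURCE A (Python) =====
-- def subtitle_for(title: str, category: str, ingredients: list[str] | None = None):
--     low = title.lower()
--     items = ingredients or []
--     top = ", ".join(items[:3]) if items else "mooie smaakmakers"
--
--     if "salade" in low:
--         return f"Een frisse en smaakvolle salade met {top}, perfect als lichte lunch of verfijnd voorgerecht."
--     if "dressing" in low:
--         return f"Een klassieke vinaigrette met {top} die bijna elke salade direct meer diepte geeft."
--     if "mayonaise" in low:
--         return f"Een romige basissaus met {top}, onmisbaar in de koude keuken."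
--     if "soep" in low:
--         return f"Een volle, verwarmende soep op basis van {top}, mooi in balans en prettig van structuur."
--     if "bouillon" in low:
--         return f"Een heldere en smaakvolle bouillon getrokken van {top}, ideaal als basis voor verdere bereidingen."
--     if any(k in low for k in ["bavarois", "parfait", "crumble", "cake", "taart", "tatin", "moelleux", "sabayon", "flensje"]):
--         return f"Een verzorgd dessert met {top}, waarin smaak en textuur mooi samenkomen."
--     if any(k in low for k in ["saus", "hollandaise", "bearnaise"]):
--         return f"Een klassieke saus met {top}, bedoeld om een gerecht glans, frisheid en diepte te geven."
--     if any(k in low for k in ["risotto", "pasta", "ravioli", "pad thai", "focaccia"]):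
--         return f"Een karaktervol gerecht met {top}, waarbij techniek en timing het verschil maken."
--     return f"Een smaakvol gerecht met {top}, uitgewerkt tot een helder en goed navolgbaar recept."
-- ===== SOURCE B (Python) =====
-- # B: instead of testing each keyword against the title, enumerate every substring
-- # window of the lowered title once and look it up in a hash map keyword -> rule
-- # priority, keeping the smallest priority seen; the answer is that rule's text.
--
-- RULES = [
--     ["salade"],
--     ["dressing"],
--     ["mayonaise"],
--     ["soep"],
--     ["bouillon"],
--     ["bavarois", "parfait", "crumble", "cake", "taart", "tatin", "moelleux", "sabayon", "flensje"],
--     ["saus", "hollandaise", "bearnaise"],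
--     ["risotto", "pasta", "ravioli", "pad thai", "focaccia"],
-- ]
--
-- TEXTS = [
--     ("Een frisse en smaakvolle salade met ", ", perfect als lichte lunch of verfijnd voorgerecht."),
--     ("Een klassieke vinaigrette met ", " die bijna elke salade direct meer diepte geeft."),
--     ("Een romige basissaus met ", ", onmisbaar in de koude keuken."),
--     ("Een volle, verwarmende soep op basis van ", ", mooi in balans en prettig van structuur."),
--     ("Een heldere en smaakvolle bouillon getrokken van ", ", ideaal als basis voor verdere bereidingen."),
--     ("Een verzorgd dessert met ", ", waarin smaak en textuur mooi samenkomen."),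
--     ("Een klassieke saus met ", ", bedoeld om een gerecht glans, frisheid en diepte te geven."),
--     ("Een karaktervol gerecht met ", ", waarbij techniek en timing het verschil maken."),
--     ("Een smaakvol gerecht met ", ", uitgewerkt tot een helder en goed navolgbaar recept."),
-- ]
--
-- KEY2RULE = {k: i for i, keys in enumerate(RULES) for k in keys}
-- LENS = sorted({len(k) for k in KEY2RULE})
--
--
-- def subtitle_for(title: str, category: str, ingredients: list[str] | None = None):
--     low = title.lower()
--     items = ingredients or []
--     top = ", ".join(items[:3]) if items else "mooie smaakmakers"
--     best = len(RULES)  # fallback priority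
--     for i in range(len(low)):
--         for L in LENS:
--             r = KEY2RULE.get(low[i:i + L])
--             if r is not None and r < best:
--                 best = r
--     pre, post = TEXTS[best]
--     return pre + top + post
-- ===== Notes on version B (the rewrite author's own statement) =====
-- stated objective: alternative
-- what changed: Instead of testing each of the 22 keywords for substring containment in priority order, B enumerates every substring window of the lowered title once, looks each window up in a precomputed hash map keyword->rule priority, keeps the minimum priority seen, and indexes a text table with it.
import Mathlib
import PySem

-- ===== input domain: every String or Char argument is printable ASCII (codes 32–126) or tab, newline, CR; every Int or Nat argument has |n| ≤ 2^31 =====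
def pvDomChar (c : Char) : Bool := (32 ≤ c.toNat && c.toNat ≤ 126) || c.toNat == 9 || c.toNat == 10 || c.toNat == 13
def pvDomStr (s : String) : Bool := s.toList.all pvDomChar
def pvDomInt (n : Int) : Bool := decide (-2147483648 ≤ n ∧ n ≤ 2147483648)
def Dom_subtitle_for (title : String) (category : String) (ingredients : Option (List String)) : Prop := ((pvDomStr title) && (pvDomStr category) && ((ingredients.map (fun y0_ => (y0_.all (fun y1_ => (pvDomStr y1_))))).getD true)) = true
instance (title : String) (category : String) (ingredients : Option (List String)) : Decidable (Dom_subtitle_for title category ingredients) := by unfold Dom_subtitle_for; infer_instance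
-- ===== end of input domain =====

-- B replaces A's per-keyword containment cascade by a single sliding-window pass that looks
-- every substring window up in a keyword→priority map and keeps the minimum priority (objective: alternative).

-- ===== PORT A =====
def subtitle_for (title : String) (category : String) (ingredients : Option (List String)) : String :=
  let low := PySem.Str.lower title
  let items := ingredients.getD []
  let top := if items ≠ [] then PySem.Str.join ", " (PySem.List.slice items none (some 3)) else "mooie smaakmakers"
  if PySem.Str.isIn "salade" low then
    "Een frisse en smaakvolle salade met " ++ top ++ ", perfect als lichte lunch of verfijnd voorgerecht."
  else if PySem.Str.isIn "dressing" low then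
    "Een klassieke vinaigrette met " ++ top ++ " die bijna elke salade direct meer diepte geeft."
  else if PySem.Str.isIn "mayonaise" low then
    "Een romige basissaus met " ++ top ++ ", onmisbaar in de koude keuken."
  else if PySem.Str.isIn "soep" low then
    "Een volle, verwarmende soep op basis van " ++ top ++ ", mooi in balans en prettig van structuur."
  else if PySem.Str.isIn "bouillon" low then
    "Een heldere en smaakvolle bouillon getrokken van " ++ top ++ ", ideaal als basis voor verdere bereidingen."
  else if ["bavarois", "parfait", "crumble", "cake", "taart", "tatin", "moelleux", "sabayon", "flensje"].any (fun k => PySem.Str.isIn k low) then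
    "Een verzorgd dessert met " ++ top ++ ", waarin smaak en textuur mooi samenkomen."
  else if ["saus", "hollandaise", "bearnaise"].any (fun k => PySem.Str.isIn k low) then
    "Een klassieke saus met " ++ top ++ ", bedoeld om een gerecht glans, frisheid en diepte te geven."
  else if ["risotto", "pasta", "ravioli", "pad thai", "focaccia"].any (fun k => PySem.Str.isIn k low) then
    "Een karaktervol gerecht met " ++ top ++ ", waarbij techniek en timing het verschil maken."
  else
    "Een smaakvol gerecht met " ++ top ++ ", uitgewerkt tot een helder en goed navolgbaar recept."

-- ===== PORT B =====
def pvRules : List (List String) :=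
  [ ["salade"],
    ["dressing"],
    ["mayonaise"],
    ["soep"],
    ["bouillon"],
    ["bavarois", "parfait", "crumble", "cake", "taart", "tatin", "moelleux", "sabayon", "flensje"],
    ["saus", "hollandaise", "bearnaise"],
    ["risotto", "pasta", "ravioli", "pad thai", "focaccia"] ]

def pvTexts : List (String × String) :=
  [ ("Een frisse en smaakvolle salade met ", ", perfect als lichte lunch of verfijnd voorgerecht."),
    ("Een klassieke vinaigrette met ", " die bijna elke salade direct meer diepte geeft."),
    ("Een romige basissaus met ", ", onmisbaar in de koude keuken."),
    ("Een volle, verwarmende soep op basis van ", ", mooi in balans en prettig van structuur."),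
    ("Een heldere en smaakvolle bouillon getrokken van ", ", ideaal als basis voor verdere bereidingen."),
    ("Een verzorgd dessert met ", ", waarin smaak en textuur mooi samenkomen."),
    ("Een klassieke saus met ", ", bedoeld om een gerecht glans, frisheid en diepte te geven."),
    ("Een karaktervol gerecht met ", ", waarbij techniek en timing het verschil maken."),
    ("Een smaakvol gerecht met ", ", uitgewerkt tot een helder en goed navolgbaar recept.") ]

-- KEY2RULE = {k: i for i, keys in enumerate(RULES) for k in keys}  (keys as char lists)
def pvKey2Rule : PySem.Dict (List Char) Int :=
  (PySem.List.enumerate pvRules).foldl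
    (fun d p => p.2.foldl (fun d k => d.insert k.toList p.1) d) PySem.Dict.empty

-- LENS = sorted({len(k) for k in KEY2RULE})
def pvLens : List Int :=
  PySem.List.sorted (PySem.Set.ofList (pvKey2Rule.keys.map (fun k => (k.length : Int)))) (fun x => x) false

def subtitle_for_alt (title : String) (category : String) (ingredients : Option (List String)) : String :=
  let lowl := (PySem.Str.lower title).toList
  let items := ingredients.getD []
  let top := if items ≠ [] then PySem.Str.join ", " (PySem.List.slice items none (some 3)) else "mooie smaakmakers"
  let best :=
    (PySem.List.pyRange 0 (lowl.length : Int) 1).foldl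
      (fun best i =>
        pvLens.foldl
          (fun best L =>
            match pvKey2Rule.get? (PySem.List.slice lowl (some i) (some (i + L))) with
            | some r => if r < best then r else best
            | none => best)
          best)
      (pvRules.length : Int)
  let pp := PySem.List.pyGetD pvTexts best ("", "")
  pp.1 ++ top ++ pp.2

-- ===== PRECONDITION & SPEC =====
def Spec_subtitle_for (title : String) (category : String) (ingredients : Option (List String)) (out : String) : Prop := out = subtitle_for_alt title category ingredients
instance (title : String) (category : String) (ingredients : Option (List String)) (out : String) : Decidable (Spec_subtitle_for title category ingredients out) := by unfold Spec_subtitle_for; infer_instance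

-- ===== CLAIM (what is proved, stated in full; the proofs are below) =====
def Claim_equal_subtitle_for : Prop := ∀ (title : String) (category : String) (ingredients : Option (List String)), Dom_subtitle_for title category ingredients → Spec_subtitle_for title category ingredients (subtitle_for title category ingredients)

-- ===== LEMMAS AND PROOFS =====

-- B's sliding-window fold, named for the proofs (definitionally the fold inside subtitle_for_alt)
def pvBest (lowl : List Char) : Int :=
  (PySem.List.pyRange 0 (lowl.length : Int) 1).foldl
    (fun best i =>
      pvLens.foldl
        (fun best L =>
          match pvKey2Rule.get? (PySem.List.slice lowl (some i) (some (i + L))) with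
          | some r => if r < best then r else best
          | none => best)
        best)
    (pvRules.length : Int)

-- B's fold, abstractly: keep the least value delivered by f along xs.
def pvRunMin {α : Type} (f : α → Option Int) (xs : List α) (b0 : Int) : Int :=
  xs.foldl (fun b x => match f x with | some r => if r < b then r else b | none => b) b0

theorem pvRunMin_le_init {α : Type} (f : α → Option Int) (xs : List α) :
    ∀ b0 : Int, pvRunMin f xs b0 ≤ b0 := by
  induction xs with
  | nil => intro b0; simp [pvRunMin]
  | cons x xs ih =>
    intro b0
    show pvRunMin f xs _ ≤ b0
    rcases hf : f x with _ | r <;> simp only [pvRunMin, hf]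
    · exact ih b0
    · split
      · exact le_trans (ih r) (by omega)
      · exact ih b0

theorem pvRunMin_le {α : Type} (f : α → Option Int) (xs : List α) :
    ∀ b0 : Int, ∀ x ∈ xs, ∀ r, f x = some r → pvRunMin f xs b0 ≤ r := by
  induction xs with
  | nil => intro b0 x hx; simp at hx
  | cons y ys ih =>
    intro b0 x hx r hr
    rcases List.mem_cons.mp hx with rfl | hx'
    · show pvRunMin f ys _ ≤ r
      rcases hf : f x with _ | r'
      · rw [hf] at hr; cases hr
      · rw [hf] at hr; cases hr
        simp only [pvRunMin, hf]
        split
        · exact pvRunMin_le_init f ys r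
        · exact le_trans (pvRunMin_le_init f ys b0) (by omega)
    · show pvRunMin f ys _ ≤ r
      rcases hf : f y with _ | r' <;> simp only [pvRunMin, hf]
      · exact ih b0 x hx' r hr
      · split
        · exact ih r' x hx' r hr
        · exact ih b0 x hx' r hr

theorem pvRunMin_cases {α : Type} (f : α → Option Int) (xs : List α) :
    ∀ b0 : Int, pvRunMin f xs b0 = b0 ∨ ∃ x ∈ xs, f x = some (pvRunMin f xs b0) := by
  induction xs with
  | nil => intro b0; left; simp [pvRunMin]
  | cons y ys ih =>
    intro b0
    show pvRunMin f ys _ = b0 ∨ ∃ x ∈ y :: ys, f x = some (pvRunMin f ys _)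
    rcases hf : f y with _ | r' <;> simp only [pvRunMin, hf]
    · rcases ih b0 with h | ⟨x, hx, hfx⟩
      · left; exact h
      · right; exact ⟨x, List.mem_cons_of_mem _ hx, hfx⟩
    · split
      · rcases ih r' with h | ⟨x, hx, hfx⟩
        · right; exact ⟨y, List.mem_cons_self .., by rw [hf]; exact congrArg some (show r' = _ from h.symm)⟩
        · right; exact ⟨x, List.mem_cons_of_mem _ hx, hfx⟩
      · rcases ih b0 with h | ⟨x, hx, hfx⟩
        · left; exact h
        · right; exact ⟨x, List.mem_cons_of_mem _ hx, hfx⟩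

-- nested fold over (i, L) = flat fold over the pair list
theorem pvNested_eq_flat {α β : Type} (xs : List α) (ys : List β)
    (g : Int → α → β → Int) :
    ∀ b0 : Int, xs.foldl (fun b i => ys.foldl (fun b L => g b i L) b) b0
      = (xs.flatMap (fun i => ys.map (fun L => (i, L)))).foldl (fun b p => g b p.1 p.2) b0 := by
  induction xs with
  | nil => intro b0; simp
  | cons x xs ih =>
    intro b0
    simp only [List.flatMap_cons, List.foldl_cons, List.foldl_append, List.foldl_map]
    exact ih _

theorem pvSlice_infix (s : List Char) (i L : Int) (hi : 0 ≤ i) (hL : 0 ≤ L) :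
    PySem.List.slice s (some i) (some (i + L)) <:+: s := by
  rw [PySem.List.slice_toNat s hi (by omega)]
  exact ((List.take_prefix _ _).isInfix).trans (List.drop_suffix _ _).isInfix

theorem pvInfix_slice (k s : List Char) (hk : k ≠ []) (h : k <:+: s) :
    ∃ i : Int, 0 ≤ i ∧ i < (s.length : Int) ∧
      PySem.List.slice s (some i) (some (i + (k.length : Int))) = k := by
  obtain ⟨pre, suf, he⟩ := h
  refine ⟨(pre.length : Int), by positivity, ?_, ?_⟩
  · subst he
    have : 0 < k.length := List.length_pos_iff.mpr hk
    simp only [List.length_append]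
    push_cast
    omega
  · rw [PySem.List.slice_natCast_add, ← he]
    rw [show pre ++ k ++ suf = pre ++ (k ++ suf) by simp]
    rw [List.drop_left, List.take_left]

-- the matched-rules predicate and concrete facts about the closed tables
def pvMatched (s : List Char) (j : Int) : Prop :=
  ∃ p ∈ pvKey2Rule.items, p.2 = j ∧ p.1 <:+: s

def pvC (jn : Nat) (s : List Char) : Prop :=
  ∃ w ∈ pvRules.getD jn [], w.toList <:+: s

theorem pvKeys_nodup : pvKey2Rule.keys.Nodup := by decide

theorem pvItem_facts : ∀ p ∈ pvKey2Rule.items,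
    p.1 ≠ [] ∧ ((p.1.length : Int) ∈ pvLens) ∧ 0 ≤ p.2 ∧ p.2 < 8 := by decide

theorem pvLens_nonneg : ∀ L ∈ pvLens, 0 ≤ L := by decide

theorem pvItems_to_rule : ∀ p ∈ pvKey2Rule.items,
    0 ≤ p.2 ∧ p.2 < 8 ∧ ∃ w ∈ pvRules.getD p.2.toNat [], w.toList = p.1 := by decide

theorem pvRule_to_items : ∀ jn ∈ List.range 8, ∀ w ∈ pvRules.getD jn [],
    (w.toList, (jn : Int)) ∈ pvKey2Rule.items := by decide

theorem pvC_to_matched (s : List Char) (jn : Nat) (hjn : jn < 8) (hc : pvC jn s) :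
    pvMatched s (jn : Int) := by
  obtain ⟨w, hw, hinf⟩ := hc
  exact ⟨(w.toList, (jn : Int)),
    pvRule_to_items jn (List.mem_range.mpr hjn) w hw, rfl, hinf⟩

theorem pvBest_eq_runMin (lowl : List Char) :
    pvBest lowl = pvRunMin
      (fun p : Int × Int => pvKey2Rule.get? (PySem.List.slice lowl (some p.1) (some (p.1 + p.2))))
      ((PySem.List.pyRange 0 (lowl.length : Int) 1).flatMap (fun i => pvLens.map (fun L => (i, L))))
      (pvRules.length : Int) := by
  rw [pvBest, pvNested_eq_flat]
  rfl

theorem pvBest_le (lowl : List Char) (j : Int) (h : pvMatched lowl j) :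
    pvBest lowl ≤ j := by
  obtain ⟨p, hp, hpj, hinf⟩ := h
  obtain ⟨hne, hLmem, _, _⟩ := pvItem_facts p hp
  obtain ⟨i, hi0, hin, hsl⟩ := pvInfix_slice p.1 lowl hne hinf
  have hget : pvKey2Rule.get? p.1 = some j := by
    rw [← hpj]
    exact PySem.Dict.get?_of_mem_items pvKey2Rule (show (p.1, p.2) ∈ pvKey2Rule.items by simpa using hp) pvKeys_nodup
  rw [pvBest_eq_runMin]
  refine pvRunMin_le _ _ _ (i, (p.1.length : Int)) ?_ j ?_
  · simp only [List.mem_flatMap, List.mem_map]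
    exact ⟨i, PySem.List.mem_pyRange_one.mpr ⟨hi0, hin⟩, _, hLmem, rfl⟩
  · show pvKey2Rule.get? (PySem.List.slice lowl (some i) (some (i + (p.1.length : Int)))) = some j
    rw [hsl]; exact hget

theorem pvBest_cases (lowl : List Char) :
    pvBest lowl = (pvRules.length : Int) ∨ pvMatched lowl (pvBest lowl) := by
  rw [pvBest_eq_runMin]
  rcases pvRunMin_cases
      (fun p : Int × Int => pvKey2Rule.get? (PySem.List.slice lowl (some p.1) (some (p.1 + p.2))))
      ((PySem.List.pyRange 0 (lowl.length : Int) 1).flatMap (fun i => pvLens.map (fun L => (i, L))))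
      (pvRules.length : Int) with h | ⟨q, hq, hfq⟩
  · left; exact h
  · right
    simp only [List.mem_flatMap, List.mem_map] at hq
    obtain ⟨i, hi, L, hL, rfl⟩ := hq
    exact ⟨(PySem.List.slice lowl (some i) (some (i + L)), _),
      PySem.Dict.mem_items_of_get?_eq_some _ hfq, rfl,
      pvSlice_infix lowl i L (PySem.List.mem_pyRange_one.mp hi).1 (pvLens_nonneg L hL)⟩

theorem pvBest_eq (s : List Char) (jn : Nat) (hjn : jn < 8) (hc : pvC jn s)
    (hlt : ∀ m : Nat, m < jn → ¬ pvC m s) : pvBest s = (jn : Int) := by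
  have h1 : pvBest s ≤ (jn : Int) := pvBest_le s jn (pvC_to_matched s jn hjn hc)
  rcases pvBest_cases s with he | hm
  · rw [he] at h1
    exfalso
    have : (pvRules.length : Int) = 8 := by norm_num [pvRules]
    omega
  · obtain ⟨p, hp, hpj, hinf⟩ := hm
    obtain ⟨hp0, hp8, w, hw, hwl⟩ := pvItems_to_rule p hp
    have hCm : pvC p.2.toNat s := ⟨w, hw, hwl ▸ hinf⟩
    have hnm : ¬ p.2.toNat < jn := fun hmlt => hlt _ hmlt hCm
    omega

theorem pvBest_eq_none (s : List Char) (h : ∀ m : Nat, m < 8 → ¬ pvC m s) :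
    pvBest s = (pvRules.length : Int) := by
  rcases pvBest_cases s with he | hm
  · exact he
  · exfalso
    obtain ⟨p, hp, hpj, hinf⟩ := hm
    obtain ⟨hp0, hp8, w, hw, hwl⟩ := pvItems_to_rule p hp
    exact h p.2.toNat (by omega) ⟨w, hw, hwl ▸ hinf⟩

theorem pvMain (low : String) (top : String) :
    (if PySem.Str.isIn "salade" low then
      "Een frisse en smaakvolle salade met " ++ top ++ ", perfect als lichte lunch of verfijnd voorgerecht."
    else if PySem.Str.isIn "dressing" low then
      "Een klassieke vinaigrette met " ++ top ++ " die bijna elke salade direct meer diepte geeft."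
    else if PySem.Str.isIn "mayonaise" low then
      "Een romige basissaus met " ++ top ++ ", onmisbaar in de koude keuken."
    else if PySem.Str.isIn "soep" low then
      "Een volle, verwarmende soep op basis van " ++ top ++ ", mooi in balans en prettig van structuur."
    else if PySem.Str.isIn "bouillon" low then
      "Een heldere en smaakvolle bouillon getrokken van " ++ top ++ ", ideaal als basis voor verdere bereidingen."
    else if ["bavarois", "parfait", "crumble", "cake", "taart", "tatin", "moelleux", "sabayon", "flensje"].any (fun k => PySem.Str.isIn k low) then
      "Een verzorgd dessert met " ++ top ++ ", waarin smaak en textuur mooi samenkomen."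
    else if ["saus", "hollandaise", "bearnaise"].any (fun k => PySem.Str.isIn k low) then
      "Een klassieke saus met " ++ top ++ ", bedoeld om een gerecht glans, frisheid en diepte te geven."
    else if ["risotto", "pasta", "ravioli", "pad thai", "focaccia"].any (fun k => PySem.Str.isIn k low) then
      "Een karaktervol gerecht met " ++ top ++ ", waarbij techniek en timing het verschil maken."
    else
      "Een smaakvol gerecht met " ++ top ++ ", uitgewerkt tot een helder en goed navolgbaar recept.")
    = (PySem.List.pyGetD pvTexts (pvBest low.toList) ("", "")).1 ++ top
      ++ (PySem.List.pyGetD pvTexts (pvBest low.toList) ("", "")).2 := by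
  simp only [PySem.Str.isIn_iff_infix, List.any_eq_true]
  by_cases c0 : pvC 0 low.toList
  · rw [if_pos (by simpa [pvC, pvRules] using c0),
      pvBest_eq low.toList 0 (by norm_num) c0 (by omega)]
    rfl
  · rw [if_neg (by simpa [pvC, pvRules] using c0)]
    by_cases c1 : pvC 1 low.toList
    · rw [if_pos (by simpa [pvC, pvRules] using c1),
        pvBest_eq low.toList 1 (by norm_num) c1 (by intro m hm; interval_cases m; assumption)]
      rfl
    · rw [if_neg (by simpa [pvC, pvRules] using c1)]
      by_cases c2 : pvC 2 low.toList
      · rw [if_pos (by simpa [pvC, pvRules] using c2),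
          pvBest_eq low.toList 2 (by norm_num) c2 (by intro m hm; interval_cases m <;> assumption)]
        rfl
      · rw [if_neg (by simpa [pvC, pvRules] using c2)]
        by_cases c3 : pvC 3 low.toList
        · rw [if_pos (by simpa [pvC, pvRules] using c3),
            pvBest_eq low.toList 3 (by norm_num) c3 (by intro m hm; interval_cases m <;> assumption)]
          rfl
        · rw [if_neg (by simpa [pvC, pvRules] using c3)]
          by_cases c4 : pvC 4 low.toList
          · rw [if_pos (by simpa [pvC, pvRules] using c4),
              pvBest_eq low.toList 4 (by norm_num) c4 (by intro m hm; interval_cases m <;> assumption)]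
            rfl
          · rw [if_neg (by simpa [pvC, pvRules] using c4)]
            by_cases c5 : pvC 5 low.toList
            · rw [if_pos (by simpa [pvC, pvRules] using c5),
                pvBest_eq low.toList 5 (by norm_num) c5 (by intro m hm; interval_cases m <;> assumption)]
              rfl
            · rw [if_neg (by simpa [pvC, pvRules] using c5)]
              by_cases c6 : pvC 6 low.toList
              · rw [if_pos (by simpa [pvC, pvRules] using c6),
                  pvBest_eq low.toList 6 (by norm_num) c6 (by intro m hm; interval_cases m <;> assumption)]
                rfl
              · rw [if_neg (by simpa [pvC, pvRules] using c6)]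
                by_cases c7 : pvC 7 low.toList
                · rw [if_pos (by simpa [pvC, pvRules] using c7),
                    pvBest_eq low.toList 7 (by norm_num) c7 (by intro m hm; interval_cases m <;> assumption)]
                  rfl
                · rw [if_neg (by simpa [pvC, pvRules] using c7)]
                  rw [pvBest_eq_none low.toList (by intro m hm; interval_cases m <;> assumption)]
                  rfl

-- ===== VERDICT (by name: the statement is the Claim_ definition above) =====
theorem subtitle_for_spec : Claim_equal_subtitle_for := by
  intro title category ingredients _
  show subtitle_for title category ingredients = subtitle_for_alt title category ingredients
  exact pvMain (PySem.Str.lower title)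
    (if (ingredients.getD []) ≠ [] then
      PySem.Str.join ", " (PySem.List.slice (ingredients.getD []) none (some 3))
    else "mooie smaakmakers")
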